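-- pv_equiv track=rewrite | github.com/janinadiers/ba-petrinet-recognizer | helper/features.py | get_edge_points
-- ===== SOURCE A (Python) =====
-- def get_edge_points(strokes_of_candidate):
--     edge_point_positions = []
--     for idx, stroke in enumerate(strokes_of_candidate):
--         if idx == 0:
--             edge_point_positions.append(0)
--             edge_point_positions.append(len(stroke) - 1)
--         else:
--             edge_point_positions.append(edge_point_positions[-1] + 1)
--             edge_point_positions.append(edge_point_positions[-1] + len(stroke) - 1)
--     return edge_point_positions
-- ===== SOURCE B (Python) =====
-- def get_edge_points(strokes_of_candidate):
--     # stage 1: prefix-sum table of stroke lengths (offsets[i] = start of stroke i)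
--     offsets = [0]
--     for stroke in strokes_of_candidate:
--         offsets.append(offsets[-1] + len(stroke))
--     # stage 2: each stroke spans [offsets[i], offsets[i+1] - 1]
--     return [p for lo, hi in zip(offsets, offsets[1:]) for p in (lo, hi - 1)]
-- ===== Notes on version B (the rewrite author's own statement) =====
-- stated objective: simpler
-- what changed: Two staged passes instead of A's state-carrying output loop: first build a prefix-sum offsets table of stroke lengths, then emit [start, next_start - 1] pairs by zipping the table with its tail, eliminating the idx==0 special case and the self-referential reads of the output list.
import Mathlib
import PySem

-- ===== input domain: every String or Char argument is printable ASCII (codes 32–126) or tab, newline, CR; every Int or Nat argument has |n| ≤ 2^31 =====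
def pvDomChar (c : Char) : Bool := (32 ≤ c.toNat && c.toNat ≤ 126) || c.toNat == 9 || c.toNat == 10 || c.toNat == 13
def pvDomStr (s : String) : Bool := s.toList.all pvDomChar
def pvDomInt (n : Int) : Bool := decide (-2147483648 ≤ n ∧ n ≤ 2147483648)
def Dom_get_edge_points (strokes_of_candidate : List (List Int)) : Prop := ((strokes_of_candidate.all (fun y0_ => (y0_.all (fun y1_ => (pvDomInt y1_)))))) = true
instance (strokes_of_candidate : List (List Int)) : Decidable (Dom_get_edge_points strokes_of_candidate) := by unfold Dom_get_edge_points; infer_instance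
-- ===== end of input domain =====

-- B replaces A's state-carrying output loop (idx==0 special case, self-referential
-- list[-1] reads of the output) by two staged passes: build a prefix-sum offsets
-- table, then emit pairs by zipping the table with its tail; objective: simpler.

-- ===== PORT A =====
-- loop body of A; edge_point_positions[-1] is read only when the list is nonempty
-- (idx > 0), so the .getD 0 default is unreachable; pyGet? (-1) is Python's list[-1]
def pvStepA (edge_point_positions : List Int) (p : Int × List Int) : List Int :=
  if p.1 == 0 then
    (edge_point_positions ++ [0]) ++ [(p.2.length : Int) - 1]
  else
    let acc1 := edge_point_positions ++
      [((PySem.List.pyGet? edge_point_positions (-1)).getD 0) + 1]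
    acc1 ++ [((PySem.List.pyGet? acc1 (-1)).getD 0) + (p.2.length : Int) - 1]

def get_edge_points (strokes_of_candidate : List (List Int)) : List Int :=
  (PySem.List.enumerate strokes_of_candidate).foldl pvStepA []

-- ===== PORT B =====
-- stage 1: prefix-sum table offsets (offsets[-1] read as pyGet? (-1));
-- stage 2: zip(offsets, offsets[1:]) flattened to [lo, hi - 1] pairs
def get_edge_points_alt (strokes_of_candidate : List (List Int)) : List Int :=
  let offsets := strokes_of_candidate.foldl
    (fun (acc : List Int) (stroke : List Int) =>
      acc ++ [((PySem.List.pyGet? acc (-1)).getD 0) + (stroke.length : Int)]) [0]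
  (offsets.zip (PySem.List.slice offsets (some 1) none)).flatMap
    (fun p => [p.1, p.2 - 1])

-- ===== PRECONDITION & SPEC =====
def Spec_get_edge_points (strokes_of_candidate : List (List Int)) (out : List Int) : Prop := out = get_edge_points_alt strokes_of_candidate
instance (strokes_of_candidate : List (List Int)) (out : List Int) : Decidable (Spec_get_edge_points strokes_of_candidate out) := by unfold Spec_get_edge_points; infer_instance

-- ===== CLAIM (what is proved, stated in full; the proofs are below) =====
def Claim_equal_get_edge_points : Prop := ∀ (strokes_of_candidate : List (List Int)), Dom_get_edge_points strokes_of_candidate → Spec_get_edge_points strokes_of_candidate (get_edge_points strokes_of_candidate)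

-- ===== LEMMAS AND PROOFS =====

-- common recursive description of the output
def pvEmit (start : Int) : List (List Int) → List Int
  | [] => []
  | st :: r => start :: (start + (st.length : Int) - 1) :: pvEmit (start + (st.length : Int)) r

-- the prefix sums after `start`
def pvOffs (start : Int) : List (List Int) → List Int
  | [] => []
  | st :: r => (start + (st.length : Int)) :: pvOffs (start + (st.length : Int)) r

theorem pvB_offsets (strokes : List (List Int)) (acc : List Int) (start : Int)
    (hlast : PySem.List.pyGet? acc (-1) = some start) :
    strokes.foldl
      (fun (acc : List Int) (stroke : List Int) =>
        acc ++ [((PySem.List.pyGet? acc (-1)).getD 0) + (stroke.length : Int)]) acc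
    = acc ++ pvOffs start strokes := by
  induction strokes generalizing acc start with
  | nil => simp [pvOffs]
  | cons st r ih =>
    rw [List.foldl_cons, hlast]
    simp only [Option.getD_some]
    rw [ih (acc ++ [start + (st.length : Int)]) (start + (st.length : Int))
      (by rw [PySem.List.pyGet?_neg_one_append_singleton])]
    simp [pvOffs]

theorem pvB_zip (start : Int) (strokes : List (List Int)) :
    ((start :: pvOffs start strokes).zip (pvOffs start strokes)).flatMap
      (fun p => [p.1, p.2 - 1]) = pvEmit start strokes := by
  induction strokes generalizing start with
  | nil => simp [pvOffs, pvEmit]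
  | cons st r ih => simpa [pvOffs, pvEmit, List.zip] using ih (start + (st.length : Int))

theorem pvB_emit (strokes : List (List Int)) :
    get_edge_points_alt strokes = pvEmit 0 strokes := by
  unfold get_edge_points_alt
  rw [pvB_offsets strokes [0] 0 (by simp [PySem.List.pyGet?_neg_one])]
  have hs : PySem.List.slice ((0 : Int) :: pvOffs 0 strokes) (some 1) none
      = pvOffs 0 strokes := by
    rw [PySem.List.slice_some_none]
    simp [PySem.List.clampIdx]
  simp only [List.cons_append, List.nil_append] at *
  rw [hs]
  exact pvB_zip 0 strokes

theorem pvStepA_ne (acc : List Int) (s : Int) (st : List Int) (start : Int) (hs : 1 ≤ s)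
    (hlast : PySem.List.pyGet? acc (-1) = some (start - 1)) :
    pvStepA acc (s, st) = (acc ++ [start]) ++ [start + (st.length : Int) - 1] := by
  have h1 : start - 1 + 1 = start := by ring
  simp only [pvStepA, beq_iff_eq, if_neg (by omega : ¬ s = 0), hlast, Option.getD_some,
    PySem.List.pyGet?_neg_one_append_singleton]
  rw [h1]

theorem pvA_emit (rest : List (List Int)) (acc : List Int) (start s : Int) (hs : 1 ≤ s)
    (hlast : PySem.List.pyGet? acc (-1) = some (start - 1)) :
    (PySem.List.enumerate rest s).foldl pvStepA acc = acc ++ pvEmit start rest := by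
  induction rest generalizing acc start s with
  | nil => simp [PySem.List.enumerate_nil, pvEmit]
  | cons st r ih =>
    rw [PySem.List.enumerate_cons, List.foldl_cons, pvStepA_ne acc s st start hs hlast]
    rw [ih _ (start + (st.length : Int)) (s + 1) (show (1:Int) ≤ s + 1 by omega)
      (by rw [PySem.List.pyGet?_neg_one_append_singleton])]
    simp [pvEmit]

-- ===== VERDICT (by name: the statement is the Claim_ definition above) =====
theorem get_edge_points_spec : Claim_equal_get_edge_points := by
  intro strokes _
  unfold Spec_get_edge_points
  rw [pvB_emit]
  unfold get_edge_points
  cases strokes with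
  | nil => simp [PySem.List.enumerate_nil, pvEmit]
  | cons st r =>
    rw [PySem.List.enumerate_cons, List.foldl_cons]
    have h0 : pvStepA [] (0, st) = ([] ++ [0]) ++ [(st.length : Int) - 1] := by
      simp [pvStepA]
    rw [h0]
    norm_num
    rw [pvA_emit r _ (st.length : Int) 1 (show (1:Int) ≤ 1 by norm_num)
      (by simp [PySem.List.pyGet?_neg_one])]
    simp [pvEmit]
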